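-- pv_equiv track=rewrite | github.com/1193639809ZD/PythonStudy | 笔试/文远知行/1.py | min_cost_to_balance
-- ===== SOURCE A (Python) =====
-- def min_cost_to_balance(a):
--     accumulation = 0
--     cost = 0
--     for i in range(len(a)):
--         accumulation += a[i]
--         # 如果累计和为负，需要从后面的正数往前移动，产生消耗
--         if accumulation < 0:
--             cost += -accumulation  # 负值越多，消耗越多
--             accumulation = 0
--     return cost
-- ===== SOURCE B (Python) =====
-- def min_cost_to_balance(a):
--     # Stage 1: build the list of running prefix sums.
--     prefixes = []
--     s = 0
--     for x in a:
--         s += x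
--         prefixes.append(s)
--     # Stage 2: the cost equals the negation of the smallest prefix sum (or 0).
--     return -min([0] + prefixes)
-- ===== Notes on version B (the rewrite author's own statement) =====
-- stated objective: alternative
-- what changed: Replaces A's single-pass clamp-to-zero accumulator with running cost counter by two staged passes: first materialise the list of prefix sums, then return the negation of the smallest prefix sum capped at zero.
import Mathlib
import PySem

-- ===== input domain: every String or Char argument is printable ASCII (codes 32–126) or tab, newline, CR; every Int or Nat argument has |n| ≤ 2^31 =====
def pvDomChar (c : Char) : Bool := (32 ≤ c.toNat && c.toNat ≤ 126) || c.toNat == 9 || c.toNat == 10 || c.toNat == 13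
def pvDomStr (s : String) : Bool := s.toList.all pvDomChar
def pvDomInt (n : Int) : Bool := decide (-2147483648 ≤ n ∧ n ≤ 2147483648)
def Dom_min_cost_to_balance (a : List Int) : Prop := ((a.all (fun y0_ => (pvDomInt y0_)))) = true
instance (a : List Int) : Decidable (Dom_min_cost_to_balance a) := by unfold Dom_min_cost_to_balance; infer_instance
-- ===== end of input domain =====

-- B computes the answer in two staged passes (materialise prefix sums, then -min([0]+prefixes))
-- instead of A's single-pass clamp-to-zero accumulator with a cost counter; objective: alternative.


-- ===== PORT A =====
-- A's loop: accumulation += a[i]; if accumulation < 0: cost += -accumulation; accumulation = 0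
def minCostLoopA (accumulation cost : Int) : List Int → Int
  | [] => cost
  | x :: xs =>
      let acc := accumulation + x
      if acc < 0 then minCostLoopA 0 (cost + (-acc)) xs
      else minCostLoopA acc cost xs

def min_cost_to_balance (a : List Int) : Int := minCostLoopA 0 0 a

-- ===== PORT B =====
-- Stage 1 of Source B: build the list of running prefix sums.
def prefixSums (s : Int) : List Int → List Int
  | [] => []
  | x :: xs => (s + x) :: prefixSums (s + x) xs

-- Stage 2 of Source B: -min([0] + prefixes); Python's min over a nonempty list is a left fold of min.
def min_cost_to_balance_alt (a : List Int) : Int :=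
  -((prefixSums 0 a).foldl min 0)

-- ===== PRECONDITION & SPEC =====
def Spec_min_cost_to_balance (a : List Int) (out : Int) : Prop := out = min_cost_to_balance_alt a
instance (a : List Int) (out : Int) : Decidable (Spec_min_cost_to_balance a out) := by unfold Spec_min_cost_to_balance; infer_instance

-- ===== CLAIM (what is proved, stated in full; the proofs are below) =====
def Claim_equal_min_cost_to_balance : Prop := ∀ (a : List Int), Dom_min_cost_to_balance a → Spec_min_cost_to_balance a (min_cost_to_balance a)

-- ===== LEMMAS AND PROOFS =====
-- Invariant: A's accumulator is s − mn and its cost is −mn, where s is the raw prefix sum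
-- and mn the minimum prefix sum seen so far (capped at 0).
theorem minCost_inv (xs : List Int) : ∀ (s mn : Int), mn ≤ s →
    minCostLoopA (s - mn) (-mn) xs = -((prefixSums s xs).foldl min mn) := by
  induction xs with
  | nil => intro s mn _; simp [minCostLoopA, prefixSums]
  | cons x xs ih =>
      intro s mn hle
      simp only [minCostLoopA, prefixSums, List.foldl]
      by_cases h : s + x < mn
      · have h' : s - mn + x < 0 := by omega
        have hm : min mn (s + x) = s + x := by omega
        simp only [if_pos h', hm]
        have h1 : -mn + -(s - mn + x) = -(s + x) := by ring
        have h2 : (0 : Int) = (s + x) - (s + x) := by ring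
        rw [h1, h2]
        exact ih (s + x) (s + x) le_rfl
      · have h' : ¬ (s - mn + x < 0) := by omega
        have hm : min mn (s + x) = mn := by omega
        simp only [if_neg h', hm]
        have h1 : s - mn + x = (s + x) - mn := by ring
        rw [h1]
        exact ih (s + x) mn (by omega)

-- ===== VERDICT (by name: the statement is the Claim_ definition above) =====
theorem min_cost_to_balance_spec : Claim_equal_min_cost_to_balance := by
  intro a _
  unfold Spec_min_cost_to_balance min_cost_to_balance min_cost_to_balance_alt
  have := minCost_inv a 0 0 le_rfl
  simpa using this
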